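-- pv_equiv track=rewrite | github.com/ArrogantL/nlp | Lab3/ME.py | get_word_shape
-- ===== SOURCE A (Python) =====
-- def get_word_shape(word, is_abbr=False):
--     """
--     获取词形
--     :param word: 目标词
--     :param is_abbr: 是否将词形中连续字符合并，如Xxxdxx合并为Xxdx
--     :return: 词型或缩写词型
--     """
--     word_shape = "shape:"
--     if is_abbr:
--         word_shape = "abbr_" + word_shape
--     for i in word:
--         if i.isupper():
--             word_shape += 'X'
--         elif i.islower():
--             word_shape += 'x'
--         elif i.isdigit():
--             word_shape += 'd'
--         else:
--             word_shape += '-'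
--         if is_abbr and word_shape[-1] == word_shape[-2]:
--             word_shape = word_shape[0:-1]
--
--     return word_shape
-- ===== SOURCE B (Python) =====
-- from itertools import groupby
--
--
-- def get_word_shape(word, is_abbr=False):
--     classes = ''.join(
--         'X' if c.isupper() else 'x' if c.islower() else 'd' if c.isdigit() else '-'
--         for c in word)
--     if is_abbr:
--         classes = ''.join(k for k, _ in groupby(classes))
--         return 'abbr_shape:' + classes
--     return 'shape:' + classes
-- ===== Notes on version B (the rewrite author's own statement) =====
-- stated objective: simpler
-- what changed: B maps the whole word to its class string in one comprehension and, for abbreviations, collapses equal runs in a separate groupby pass, instead of A's incremental build that appends one symbol at a time and pops it again when it equals the previous character of the growing result string.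
import Mathlib
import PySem

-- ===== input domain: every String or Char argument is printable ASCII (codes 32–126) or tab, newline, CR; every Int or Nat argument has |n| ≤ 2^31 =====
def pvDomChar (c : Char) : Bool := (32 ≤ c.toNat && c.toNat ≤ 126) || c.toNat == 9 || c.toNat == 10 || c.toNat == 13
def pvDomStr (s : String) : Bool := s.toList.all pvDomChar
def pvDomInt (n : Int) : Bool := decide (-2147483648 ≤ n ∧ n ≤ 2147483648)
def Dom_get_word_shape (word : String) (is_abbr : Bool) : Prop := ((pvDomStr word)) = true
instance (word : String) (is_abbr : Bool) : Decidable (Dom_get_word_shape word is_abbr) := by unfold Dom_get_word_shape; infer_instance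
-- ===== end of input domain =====

-- B maps the word to its class string in one pass and (for abbreviations) collapses equal
-- runs in a separate groupby-style pass, instead of A's append-then-pop incremental build.

-- ===== PORT A =====
-- body of A's for-loop: append one class symbol, and in abbr mode pop it again
-- (slice [0:-1]) when word_shape[-1] == word_shape[-2]
def pvStepA (is_abbr : Bool) (word_shape : List Char) (i : Char) : List Char :=
  let word_shape := word_shape ++
    [if PySem.Chars.isupper i then 'X'
     else if PySem.Chars.islower i then 'x'
     else if PySem.Chars.isdigit i then 'd'
     else '-']
  if is_abbr = true ∧
      PySem.List.pyGet? word_shape (-1) = PySem.List.pyGet? word_shape (-2) then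
    PySem.List.slice word_shape (some 0) (some (-1))
  else word_shape

def get_word_shape (word : String) (is_abbr : Bool) : String :=
  let ws0 := if is_abbr then ("abbr_" ++ "shape:").toList else "shape:".toList
  String.ofList (word.toList.foldl (pvStepA is_abbr) ws0)

-- ===== PORT B =====
-- character class of one character (Source B's conditional expression)
def pvCls (c : Char) : Char :=
  if PySem.Chars.isupper c then 'X'
  else if PySem.Chars.islower c then 'x'
  else if PySem.Chars.isdigit c then 'd'
  else '-'

-- itertools.groupby collapse: keep the first symbol of each run of equal symbols
def pvGrp : List Char → List Char
  | [] => []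
  | a :: r => a :: pvGrp (r.dropWhile (· == a))
termination_by l => l.length
decreasing_by simpa [Nat.lt_succ_iff] using List.length_dropWhile_le (· == a) r

def get_word_shape_alt (word : String) (is_abbr : Bool) : String :=
  let classes := word.toList.map pvCls
  if is_abbr then String.ofList ("abbr_shape:".toList ++ pvGrp classes)
  else String.ofList ("shape:".toList ++ classes)

-- ===== PRECONDITION & SPEC =====
def Spec_get_word_shape (word : String) (is_abbr : Bool) (out : String) : Prop := out = get_word_shape_alt word is_abbr
instance (word : String) (is_abbr : Bool) (out : String) : Decidable (Spec_get_word_shape word is_abbr out) := by unfold Spec_get_word_shape; infer_instance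

-- ===== CLAIM (what is proved, stated in full; the proofs are below) =====
def Claim_equal_get_word_shape : Prop := ∀ (word : String) (is_abbr : Bool), Dom_get_word_shape word is_abbr → Spec_get_word_shape word is_abbr (get_word_shape word is_abbr)

-- ===== LEMMAS AND PROOFS =====

lemma pvGrp_nil : pvGrp [] = [] := by rw [pvGrp]

lemma pvGrp_cons (a : Char) (r : List Char) :
    pvGrp (a :: r) = a :: pvGrp (r.dropWhile (· == a)) := by rw [pvGrp]

lemma pvCls_ne_colon (c : Char) : pvCls c ≠ ':' := by
  unfold pvCls; split_ifs <;> decide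

lemma stepA_false (ws : List Char) (c : Char) :
    pvStepA false ws c = ws ++ [pvCls c] := by
  simp [pvStepA, pvCls]

lemma stepA_true (p : List Char) (e c : Char) :
    pvStepA true (p ++ [e]) c =
      if pvCls c = e then p ++ [e] else (p ++ [e]) ++ [pvCls c] := by
  have hget1 : PySem.List.pyGet? ((p ++ [e]) ++ [pvCls c]) (-1) = some (pvCls c) := by
    simp [PySem.List.pyGet?, PySem.List.pyIdx?]
  have hget2 : PySem.List.pyGet? ((p ++ [e]) ++ [pvCls c]) (-2) = some e := by
    simp [PySem.List.pyGet?, PySem.List.pyIdx?]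
  have hsl : PySem.List.slice ((p ++ [e]) ++ [pvCls c]) (some 0) (some (-1)) = p ++ [e] := by
    simp only [PySem.List.slice]
    rw [show (p ++ [e]) ++ [pvCls c] = p ++ [e, pvCls c] by simp]
    simp only [List.length_append, List.length_cons]
    rw [show p ++ [e, pvCls c] = (p ++ [e]) ++ [pvCls c] by simp]
    simpa using List.take_left (l₁ := p ++ [e]) (l₂ := [pvCls c])
  show (if true = true ∧
      PySem.List.pyGet? ((p ++ [e]) ++ [pvCls c]) (-1) =
        PySem.List.pyGet? ((p ++ [e]) ++ [pvCls c]) (-2) then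
      PySem.List.slice ((p ++ [e]) ++ [pvCls c]) (some 0) (some (-1))
    else (p ++ [e]) ++ [pvCls c]) = _
  rw [hget1, hget2, hsl]
  by_cases h : pvCls c = e
  · rw [if_pos ⟨rfl, by rw [h]⟩, if_pos h]
  · rw [if_neg (fun hc => h (Option.some.inj hc.2)), if_neg h]

-- the collapse of A's abbr loop, seeded with the character currently at the end of the result
def pvGrpFrom (e : Char) : List Char → List Char
  | [] => []
  | a :: r => if a = e then pvGrpFrom e r else a :: pvGrpFrom a r

-- A's abbr-mode fold, started from any list ending in e, computes pvGrpFrom e of the class list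
lemma foldA_abbr (l : List Char) (p : List Char) (e : Char) :
    l.foldl (pvStepA true) (p ++ [e]) = p ++ e :: pvGrpFrom e (l.map pvCls) := by
  induction l generalizing p e with
  | nil => simp [pvGrpFrom]
  | cons c r ih =>
    simp only [List.foldl_cons, List.map_cons, pvGrpFrom, stepA_true]
    by_cases h : pvCls c = e
    · rw [if_pos h, if_pos h, ih]
    · rw [if_neg h, if_neg h, ih (p ++ [e]) (pvCls c)]
      simp

-- pvGrpFrom seeded with the last kept symbol is pvGrp after dropping that run
lemma pvGrpFrom_eq_grp_drop (r : List Char) (a : Char) :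
    pvGrpFrom a r = pvGrp (r.dropWhile (· == a)) := by
  induction r generalizing a with
  | nil => simp [pvGrpFrom, pvGrp_nil]
  | cons b r' ih =>
    by_cases h : b = a
    · subst h
      rw [show pvGrpFrom b (b :: r') = pvGrpFrom b r' from if_pos rfl]
      rw [List.dropWhile_cons, if_pos (by simp)]
      exact ih b
    · rw [show pvGrpFrom a (b :: r') = b :: pvGrpFrom b r' from if_neg h]
      rw [List.dropWhile_cons, if_neg (by simpa using h), pvGrp_cons, ih b]

-- seeded with a character absent from the list, pvGrpFrom is exactly pvGrp
lemma pvGrpFrom_eq_grp (L : List Char) (e : Char) (h : ∀ a ∈ L, a ≠ e) :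
    pvGrpFrom e L = pvGrp L := by
  cases L with
  | nil => simp [pvGrpFrom, pvGrp_nil]
  | cons a r =>
    have ha : a ≠ e := h a (by simp)
    rw [show pvGrpFrom e (a :: r) = a :: pvGrpFrom a r from if_neg ha,
      pvGrp_cons, pvGrpFrom_eq_grp_drop]

-- A's non-abbr fold just appends the class of each character
lemma foldA_plain (l : List Char) (p : List Char) :
    l.foldl (pvStepA false) p = p ++ l.map pvCls := by
  induction l generalizing p with
  | nil => simp
  | cons c r ih => simp only [List.foldl_cons, List.map_cons, stepA_false]; rw [ih]; simp

-- ===== VERDICT (by name: the statement is the Claim_ definition above) =====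
theorem get_word_shape_spec : Claim_equal_get_word_shape := by
  intro word is_abbr _
  unfold Spec_get_word_shape get_word_shape get_word_shape_alt
  cases is_abbr with
  | false => simp [foldA_plain]
  | true =>
    simp only [if_true]
    have hinit : ("abbr_" ++ "shape:").toList = "abbr_shape".toList ++ [':'] := by decide
    rw [hinit, foldA_abbr]
    rw [pvGrpFrom_eq_grp _ ':' (by
      intro a ha hcolon
      obtain ⟨c, _, rfl⟩ := List.mem_map.mp ha
      exact pvCls_ne_colon c hcolon)]
    simp
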